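-- pv_equiv track=rewrite | github.com/sachoker/saber_test | main.py | sort_tasks
-- ===== SOURCE A (Python) =====
-- def sort_tasks(task: str, task_list: dict) -> list:
--     """
--     Recursively sorts tasks based on dependencies.
--
--     Parameters:
--         task (str): The task to be sorted.
--         task_list (dict): The list of tasks
--
--     Returns:
--         list: A list of tasks sorted based on their dependencies.
--     """
--     if task not in task_list:
--         return []
--
--     sorted_tasks = []
--     for t in task_list[task]['dependencies']:
--         sorted_tasks.extend(sort_tasks(t, task_list))
--     sorted_tasks.append(task)
--     return sorted_tasks
-- ===== SOURCE B (Python) =====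
-- def sort_tasks(task: str, task_list: dict) -> list:
--     """Builds the post-order back-to-front: pre-order walk over reversed
--     dependency lists into one shared accumulator, reversed at the end."""
--     if task not in task_list:
--         return []
--     acc = []
--
--     def visit(t):
--         acc.append(t)
--         for d in reversed(task_list[t]['dependencies']):
--             if d in task_list:
--                 visit(d)
--
--     visit(task)
--     return acc[::-1]
-- ===== Notes on version B (the rewrite author's own statement) =====
-- stated objective: alternative
-- what changed: A builds each node's list bottom-up, copying every child's fully built sublist into its parent via extend; B does one pre-order walk over reversed dependency lists appending each visited task to a single shared accumulator and reverses it once at the end.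
import Mathlib
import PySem

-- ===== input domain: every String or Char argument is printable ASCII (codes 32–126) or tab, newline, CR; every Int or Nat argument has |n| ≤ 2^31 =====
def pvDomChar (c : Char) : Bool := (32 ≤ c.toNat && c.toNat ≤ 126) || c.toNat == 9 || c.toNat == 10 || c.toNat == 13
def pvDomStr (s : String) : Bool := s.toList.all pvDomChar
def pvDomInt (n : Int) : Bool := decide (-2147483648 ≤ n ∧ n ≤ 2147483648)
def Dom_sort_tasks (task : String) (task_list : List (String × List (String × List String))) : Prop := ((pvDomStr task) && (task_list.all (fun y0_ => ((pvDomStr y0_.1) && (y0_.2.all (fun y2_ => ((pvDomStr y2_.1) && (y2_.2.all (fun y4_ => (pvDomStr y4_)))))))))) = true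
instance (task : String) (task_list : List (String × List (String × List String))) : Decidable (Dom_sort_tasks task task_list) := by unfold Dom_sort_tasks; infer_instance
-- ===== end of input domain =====

-- B builds the post-order back-to-front (pre-order walk over reversed dependency lists
-- into one shared accumulator, reversed once at the end); objective: alternative decomposition.

-- ===== PORT A =====
-- `task_list[t]['dependencies']` (none = KeyError at either lookup; Python dict semantics via Dict.ofList)
def pvDeps (task_list : List (String × List (String × List String))) (t : String) : Option (List String) :=
  match (PySem.Dict.ofList task_list).get? t with
  | none => none
  | some v => (PySem.Dict.ofList v).get? "dependencies"

-- A's recursion, with fuel for totality; on inputs satisfying Pre_ the recursion depth is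
-- at most the number of keys + 1, so fuel task_list.length + 2 is never exhausted there.
def sortA (task_list : List (String × List (String × List String))) : Nat → String → List String
  | 0, _ => []
  | fuel + 1, task =>
    if (PySem.Dict.ofList task_list).contains task = false then []
    else
      (match pvDeps task_list task with
       | none => []  -- Python raises KeyError here (missing 'dependencies'); excluded by Pre_
       | some ds => ds.foldl (fun acc t => acc ++ sortA task_list fuel t) []) ++ [task]

def sort_tasks (task : String) (task_list : List (String × List (String × List String))) : List String :=
  sortA task_list (task_list.length + 2) task

-- ===== PORT B =====
-- visit(t): acc.append(t); for d in reversed(task_list[t]['dependencies']): if d in task_list: visit(d)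
def sortB (task_list : List (String × List (String × List String))) : Nat → String → List String → List String
  | 0, _, acc => acc
  | fuel + 1, t, acc =>
    let acc := acc ++ [t]
    match pvDeps task_list t with
    | none => acc  -- Python raises KeyError here; excluded by Pre_
    | some ds =>
      ds.reverse.foldl
        (fun a d => if (PySem.Dict.ofList task_list).contains d then sortB task_list fuel d a else a) acc

def sort_tasks_alt (task : String) (task_list : List (String × List (String × List String))) : List String :=
  if (PySem.Dict.ofList task_list).contains task then
    (sortB task_list (task_list.length + 2) task []).reverse
  else []

-- ===== PRECONDITION & SPEC =====
-- successor set of a node in the dependency graph ([] for non-keys / missing 'dependencies')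
def pvSuccs (task_list : List (String × List (String × List String))) (t : String) : List String :=
  (pvDeps task_list t).getD []

-- one round of reachability expansion, then its iteration (a plain graph closure, not the ports' recursion)
def pvExpand (task_list : List (String × List (String × List String))) (s : List String) : List String :=
  (s ++ s.flatMap (pvSuccs task_list)).dedup

-- the set of nodes reachable from s: a path in a graph with ≤ task_list.length keyed nodes
-- revisits a node after at most that many steps, so saturating the edge relation that often
-- yields exactly the reachable set (a condition on the input graph, not the ports' recursion)
def pvReachable (task_list : List (String × List (String × List String))) (s : List String) : List String :=
  (pvExpand task_list)^[task_list.length + 2] s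

-- Pre_ = exactly the inputs on which Python A returns: every key reachable from `task` has a
-- 'dependencies' entry (otherwise A raises KeyError) and no reachable node lies on a cycle
-- (otherwise A recurses forever).
def Pre_sort_tasks (task : String) (task_list : List (String × List (String × List String))) : Prop :=
  (∀ x ∈ pvReachable task_list [task],
      (PySem.Dict.ofList task_list).contains x → (pvDeps task_list x).isSome) ∧
  (∀ x ∈ pvReachable task_list [task], x ∉ pvReachable task_list (pvSuccs task_list x))

instance (task : String) (task_list : List (String × List (String × List String))) : Decidable (Pre_sort_tasks task task_list) := by unfold Pre_sort_tasks; infer_instance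

def pvWitness_sort_tasks : String × (List (String × List (String × List String))) :=
  ("a", [("a", [("dependencies", ["b", "c"])]), ("b", [("dependencies", ["c"])]), ("c", [("dependencies", [])])])

def Spec_sort_tasks (task : String) (task_list : List (String × List (String × List String))) (out : List String) : Prop := out = sort_tasks_alt task task_list
instance (task : String) (task_list : List (String × List (String × List String))) (out : List String) : Decidable (Spec_sort_tasks task task_list out) := by unfold Spec_sort_tasks; infer_instance

-- ===== CLAIM (what is proved, stated in full; the proofs are below) =====
def Claim_equal_sort_tasks : Prop := ∀ (task : String) (task_list : List (String × List (String × List String))), Dom_sort_tasks task task_list → Pre_sort_tasks task task_list → Spec_sort_tasks task task_list (sort_tasks task task_list)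

-- ===== LEMMAS AND PROOFS =====
theorem sortA_nonmem (task_list : List (String × List (String × List String))) (fuel : Nat)
    (t : String) (h : (PySem.Dict.ofList task_list).contains t = false) :
    sortA task_list fuel t = [] := by
  cases fuel with
  | zero => rfl
  | succ f => simp [sortA, h]

-- B's accumulator walk computes A's post-order, reversed, appended to the accumulator.
theorem sortB_eq (task_list : List (String × List (String × List String))) :
    ∀ (fuel : Nat) (t : String) (acc : List String),
      (PySem.Dict.ofList task_list).contains t = true →
      sortB task_list fuel t acc = acc ++ (sortA task_list fuel t).reverse := by
  intro fuel
  induction fuel with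
  | zero => intro t acc _; simp [sortB, sortA]
  | succ f ih =>
    intro t acc hmem
    cases hd : pvDeps task_list t with
    | none => simp [sortB, sortA, hmem, hd]
    | some ds =>
      simp only [sortB, sortA, hmem, hd, Bool.true_eq_false, if_false]
      have hstep : ∀ (a : List String), ∀ d ∈ ds.reverse,
          (if (PySem.Dict.ofList task_list).contains d then sortB task_list f d a else a)
            = a ++ (sortA task_list f d).reverse := by
        intro a d _
        by_cases hc : (PySem.Dict.ofList task_list).contains d = true
        · simp [hc, ih d a hc]
        · simp at hc
          simp [hc, sortA_nonmem task_list f d hc]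
      have hfold : ∀ (l : List String) (a : List String),
          (∀ (b : List String), ∀ d ∈ l,
            (if (PySem.Dict.ofList task_list).contains d then sortB task_list f d b else b)
              = b ++ (sortA task_list f d).reverse) →
          l.foldl (fun b d => if (PySem.Dict.ofList task_list).contains d then sortB task_list f d b else b) a
            = a ++ l.flatMap (fun d => (sortA task_list f d).reverse) := by
        intro l
        induction l with
        | nil => intro a _; simp
        | cons x xs ihl =>
          intro a hall
          simp only [List.foldl_cons, List.flatMap_cons]
          rw [hall a x (by simp), ihl _ (fun b d hd => hall b d (by simp [hd]))]
          simp
      rw [hfold ds.reverse _ (fun b d hd => hstep b d hd)]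
      rw [PySem.List.foldl_append_eq_flatMap]
      simp [List.reverse_flatMap]
      rfl

-- ===== VERDICT (by name: the statement is the Claim_ definition above) =====
theorem sort_tasks_spec : Claim_equal_sort_tasks := by
  intro task task_list _ _
  unfold Spec_sort_tasks sort_tasks sort_tasks_alt
  by_cases hmem : (PySem.Dict.ofList task_list).contains task = true
  · rw [if_pos hmem, sortB_eq task_list _ task [] hmem]
    simp
  · simp at hmem
    rw [if_neg (by simp [hmem]), sortA_nonmem task_list _ task hmem]
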